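-- pv_equiv track=rewrite | github.com/Statisticians-Without-Borders-GVCEH/SWB-GVCEH | scraper/scraper.py | prep_subq
-- ===== SOURCE A (Python) =====
-- def prep_subq(KEYWORDS_DICT, CHUNKS):
--     """
--     Generates the list of strings
--     Each string is the keyword subquery
--     """
--     ### make one list of keywords
--     if type(KEYWORDS_DICT) is not list:
--         allkw = sum(KEYWORDS_DICT.values(), [])
--     else:
--         allkw = KEYWORDS_DICT
--
--     ### chunk it down, we can't exceed 512 character a query
--     allkw = [allkw[i::CHUNKS] for i in range(CHUNKS)]
--
--     subq = []
--
--     for a in allkw: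
--         ### we use OR to help reduce number of queries
--         subq.append(" OR ".join(a))
--
--     return subq
-- ===== SOURCE B (Python) =====
-- def prep_subq(KEYWORDS_DICT, CHUNKS):
--     """
--     Generates the list of keyword subquery strings
--     (round-robin single-pass distribution instead of strided slices)
--     """
--     ### make one list of keywords
--     if type(KEYWORDS_DICT) is not list:
--         allkw = [kw for kws in KEYWORDS_DICT.values() for kw in kws]
--     else:
--         allkw = KEYWORDS_DICT
--
--     ### no chunks -> no subqueries
--     if CHUNKS < 1:
--         return []
--
--     ### distribute keywords round-robin over CHUNKS buckets in one pass
--     buckets = [[] for _ in range(CHUNKS)]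
--     for idx, kw in enumerate(allkw):
--         buckets[idx % CHUNKS].append(kw)
--
--     return [" OR ".join(b) for b in buckets]
-- ===== Notes on version B (the rewrite author's own statement) =====
-- stated objective: faster
-- what changed: Replaces the CHUNKS strided slice scans (allkw[i::CHUNKS] for each i) by a single round-robin pass that distributes each keyword into bucket idx % CHUNKS, then joins the buckets.
import Mathlib
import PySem

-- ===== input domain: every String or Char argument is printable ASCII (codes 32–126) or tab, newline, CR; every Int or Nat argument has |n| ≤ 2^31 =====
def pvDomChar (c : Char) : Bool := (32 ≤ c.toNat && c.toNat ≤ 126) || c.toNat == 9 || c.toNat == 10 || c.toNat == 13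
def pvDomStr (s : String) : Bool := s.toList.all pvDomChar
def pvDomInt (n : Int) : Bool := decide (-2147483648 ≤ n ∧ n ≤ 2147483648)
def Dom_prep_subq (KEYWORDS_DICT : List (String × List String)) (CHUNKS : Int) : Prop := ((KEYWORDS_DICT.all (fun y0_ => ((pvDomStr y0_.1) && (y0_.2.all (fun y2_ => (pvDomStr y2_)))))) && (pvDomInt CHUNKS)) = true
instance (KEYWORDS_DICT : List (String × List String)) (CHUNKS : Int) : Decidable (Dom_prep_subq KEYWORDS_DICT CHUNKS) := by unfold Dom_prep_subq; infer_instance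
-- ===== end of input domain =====

-- B replaces A's CHUNKS strided-slice scans by one round-robin distribution pass (objective: faster, measured).

-- ===== PORT A =====
def prep_subq (KEYWORDS_DICT : List (String × List String)) (CHUNKS : Int) : List String :=
  -- allkw = sum(KEYWORDS_DICT.values(), [])   (the argument is a dict under the type convention)
  let allkw := ((PySem.Dict.mk KEYWORDS_DICT).values).foldl (fun acc l => acc ++ l) []
  -- allkw = [allkw[i::CHUNKS] for i in range(CHUNKS)]
  let allkw2 := (PySem.List.pyRange 0 CHUNKS 1).map
    (fun i => (PySem.List.slice? allkw (some i) none CHUNKS).getD [])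
  -- subq = []; for a in allkw: subq.append(" OR ".join(a))
  allkw2.foldl (fun subq a => subq ++ [PySem.Str.join " OR " a]) []

-- ===== PORT B =====
def prep_subq_alt (KEYWORDS_DICT : List (String × List String)) (CHUNKS : Int) : List String :=
  -- allkw = [kw for kws in KEYWORDS_DICT.values() for kw in kws]
  let allkw := ((PySem.Dict.mk KEYWORDS_DICT).values).flatMap (fun kws => kws)
  -- if CHUNKS < 1: return []
  if CHUNKS < 1 then []
  else
    -- buckets = [[] for _ in range(CHUNKS)]
    let buckets0 := List.replicate CHUNKS.toNat ([] : List String)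
    -- for idx, kw in enumerate(allkw): buckets[idx % CHUNKS].append(kw)
    let buckets := (PySem.List.enumerate allkw).foldl
      (fun bs p => bs.modify (PySem.Int.mod p.1 CHUNKS).toNat (fun b => b ++ [p.2])) buckets0
    -- return [" OR ".join(b) for b in buckets]
    buckets.map (fun b => PySem.Str.join " OR " b)

-- ===== PRECONDITION & SPEC =====
def Spec_prep_subq (KEYWORDS_DICT : List (String × List String)) (CHUNKS : Int) (out : List String) : Prop := out = prep_subq_alt KEYWORDS_DICT CHUNKS
instance (KEYWORDS_DICT : List (String × List String)) (CHUNKS : Int) (out : List String) : Decidable (Spec_prep_subq KEYWORDS_DICT CHUNKS out) := by unfold Spec_prep_subq; infer_instance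

-- ===== CLAIM (what is proved, stated in full; the proofs are below) =====
def Claim_equal_prep_subq : Prop := ∀ (KEYWORDS_DICT : List (String × List String)) (CHUNKS : Int), Dom_prep_subq KEYWORDS_DICT CHUNKS → Spec_prep_subq KEYWORDS_DICT CHUNKS (prep_subq KEYWORDS_DICT CHUNKS)

-- ===== LEMMAS AND PROOFS =====

-- 'for x: acc.append(f x)' is map
theorem pv_foldl_append_map {α β : Type} (xs : List α) (f : α → β) (acc : List β) :
    xs.foldl (fun s a => s ++ [f a]) acc = acc ++ xs.map f := by
  induction xs generalizing acc with
  | nil => simp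
  | cons x xs ih => simp [List.foldl, ih]

-- 'sum(lists, [])' is flatten
theorem pv_foldl_flatten {α : Type} (ls : List (List α)) (acc : List α) :
    ls.foldl (fun s l => s ++ l) acc = acc ++ ls.flatten := by
  induction ls generalizing acc with
  | nil => simp
  | cons l ls ih => simp [List.foldl, ih]

-- the elements a single strided pass starting at absolute position j puts into bucket t (0-based, mod n)
def pvEpick {α : Type} (n : Nat) : List α → Nat → Nat → List α
  | [], _, _ => []
  | x :: xs, j, t => (if j % n = t then [x] else []) ++ pvEpick n xs (j + 1) t

-- Python mod on a nonnegative value and positive modulus is Nat mod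
theorem pvM1 (j n : Nat) : (PySem.Int.mod (j:Int) (n:Int)).toNat = j % n := by
  have h : Int.fmod (j:Int) (n:Int) = (j:Int) % (n:Int) := by
    rw [Int.fmod_eq_emod]; simp
  rw [PySem.Int.mod, h, ← Int.natCast_mod, Int.toNat_natCast]

theorem pvDist (r t n : Nat) (hr : r < n) (ht : t < n) :
    (r ≤ t ∧ (t + n - r) % n = t - r) ∨ (t < r ∧ (t + n - r) % n = t + n - r) := by
  rcases Nat.lt_or_ge t r with h | h
  · right
    exact ⟨h, Nat.mod_eq_of_lt (by omega)⟩
  · left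
    refine ⟨h, ?_⟩
    rw [show t + n - r = (t - r) + n by omega, Nat.add_mod_right, Nat.mod_eq_of_lt (by omega)]

theorem pvSucc (j n : Nat) (hn : 0 < n) :
    (j % n + 1 = n ∧ (j + 1) % n = 0) ∨ (j % n + 1 < n ∧ (j + 1) % n = j % n + 1) := by
  have hr : j % n < n := Nat.mod_lt _ hn
  by_cases hone : n = 1
  · subst hone
    left
    omega
  · have h1n : 1 % n = 1 := Nat.mod_eq_of_lt (by omega)
    have hadd : (j + 1) % n = (j % n + 1) % n := by rw [Nat.add_mod, h1n]
    by_cases h : j % n + 1 = n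
    · left
      refine ⟨h, ?_⟩
      rw [hadd, h, Nat.mod_self]
    · right
      refine ⟨by omega, ?_⟩
      rw [hadd, Nat.mod_eq_of_lt (by omega)]

-- elementwise characterisation of A's strided slice  allkw[i::n]  (0 < n, 0-based start i)
theorem pv_slice_getElem? {α : Type} (xs : List α) (i n k : Nat) (hn : 0 < n) :
    ((PySem.List.slice? xs (some (i : Int)) none (n : Int)).getD [])[k]? = xs[i + n * k]? := by
  rw [PySem.List.slice?, if_neg (by positivity : ¬((n:Int) = 0)), PySem.List.sliceIndices]
  simp only [if_neg (by omega : ¬((n:Int) < 0)), if_pos (by omega : (0:Int) < (n:Int)),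
    if_neg (by omega : ¬((i:Int) < 0))]
  rcases Nat.lt_or_ge i xs.length with hi | hi
  · -- i < len : start = i, count = (len - i + n - 1) / n
    have hmin : min (i:Int) (xs.length:Int) = (i:Int) := by omega
    rw [hmin, if_pos (by exact_mod_cast hi)]
    set q : Nat := (xs.length - i + n - 1) / n with hq
    have hcast : (((xs.length:Int) - (i:Int) + (n:Int) - 1) / (n:Int)).toNat = q := by
      rw [show ((xs.length:Int) - (i:Int) + (n:Int) - 1) = ((xs.length - i + n - 1 : Nat) : Int)
        by omega]
      rw [show ((xs.length - i + n - 1 : Nat) : Int) / (n:Int) = ((xs.length - i + n - 1) / n : Nat)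
        from by exact_mod_cast rfl]
      exact Int.toNat_natCast _
    rw [hcast]
    have hq1 : q = (xs.length - i - 1) / n + 1 := by
      rw [hq, show xs.length - i + n - 1 = (xs.length - i - 1) + n by omega, Nat.add_div_right _ hn]
    have hdm := Nat.div_add_mod (xs.length - i - 1) n
    have hml := Nat.mod_lt (xs.length - i - 1) hn
    have hF1 : ∀ c : Nat, c < q → i + n * c < xs.length := by
      intro c hc
      have h1 : n * c ≤ n * ((xs.length - i - 1) / n) := Nat.mul_le_mul_left n (by omega)
      omega
    have hF2 : ∀ c : Nat, q ≤ c → xs.length ≤ i + n * c := by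
      intro c hc
      have h1 : n * q ≤ n * c := Nat.mul_le_mul_left n hc
      have h2 : n * q = n * ((xs.length - i - 1) / n) + n := by rw [hq1]; ring
      omega
    have hne : xs ≠ [] := by intro h; rw [h] at hi; simp at hi
    have hmap : (List.range q).filterMap (fun c => xs[((i:Int) + (n:Int) * ((c:Nat):Int)).toNat]?)
        = (List.range q).map (fun c => xs.getD (i + n * c) (xs.head hne)) := by
      rw [List.filterMap_congr (g := fun c => some (xs.getD (i + n * c) (xs.head hne))) ?_]
      · exact congrFun List.filterMap_eq_map _
      · intro c hc
        rw [List.mem_range] at hc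
        have hidx : (((i:Int)) + (n:Int) * ((c:Nat):Int)).toNat = i + n * c := by
          rw [show ((i:Int)) + (n:Int) * ((c:Nat):Int) = ((i + n * c : Nat) : Int) by push_cast; ring]
          exact Int.toNat_natCast _
        rw [hidx, List.getElem?_eq_getElem (hF1 c hc)]
        simp only [List.getD_eq_getElem?_getD, List.getElem?_eq_getElem (hF1 c hc),
          Option.getD_some]
    rw [Option.getD_some, hmap, List.getElem?_map]
    rcases Nat.lt_or_ge k q with hk | hk
    · rw [List.getElem?_range hk, Option.map_some, List.getElem?_eq_getElem (hF1 k hk),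
        List.getD_eq_getElem?_getD, List.getElem?_eq_getElem (hF1 k hk), Option.getD_some]
    · rw [List.getElem?_eq_none (by simpa using hk), List.getElem?_eq_none (hF2 k hk)]
      rfl
  · -- len ≤ i : start clamps to len, empty slice
    have hmin : min (i:Int) (xs.length:Int) = (xs.length:Int) := by omega
    rw [hmin, if_neg (by omega : ¬((xs.length:Int) < (xs.length:Int)))]
    simp [List.getElem?_eq_none (by omega : xs.length ≤ i + n * k)]


-- elementwise characterisation of a bucket of the round-robin pass
theorem pv_epick_getElem? {α : Type} (n : Nat) (xs : List α) (j t k : Nat)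
    (hn : 0 < n) (ht : t < n) :
    (pvEpick n xs j t)[k]? = xs[(t + n - j % n) % n + n * k]? := by
  induction xs generalizing j k with
  | nil => simp [pvEpick]
  | cons x xs ih =>
    have hr : j % n < n := Nat.mod_lt _ hn
    have hr' : (j + 1) % n < n := Nat.mod_lt _ hn
    have hd := pvDist (j % n) t n hr ht
    have hd' := pvDist ((j + 1) % n) t n hr' ht
    have hs := pvSucc j n hn
    simp only [pvEpick]
    by_cases hjt : j % n = t
    · rw [if_pos hjt, List.singleton_append]
      have hd0 : (t + n - j % n) % n = 0 := by omega
      rw [hd0]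
      cases k with
      | zero => simp
      | succ k =>
        rw [List.getElem?_cons_succ, ih (j + 1) k]
        have hmul : n * (k + 1) = n * k + n := by ring
        rw [show (0 + n * (k + 1)) = ((t + n - (j + 1) % n) % n + n * k) + 1 by omega,
          List.getElem?_cons_succ]
    · rw [if_neg hjt, List.nil_append, ih (j + 1) k]
      have hdge : 1 ≤ (t + n - j % n) % n := by omega
      rw [show ((t + n - j % n) % n + n * k) = ((t + n - j % n) % n - 1 + n * k) + 1 by omega,
        List.getElem?_cons_succ]
      congr 1
      omega

-- the bucket fold computes pvEpick bucketwise
theorem pv_fold_buckets {α : Type} (n : Nat) (hn : 0 < n) (xs : List α) (j : Nat)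
    (init : List (List α)) (hl : init.length = n) :
    (PySem.List.enumerate xs (j : Int)).foldl
      (fun bs p => bs.modify (PySem.Int.mod p.1 (n : Int)).toNat (fun b => b ++ [p.2])) init
    = (List.range n).map (fun t => init.getD t [] ++ pvEpick n xs j t) := by
  induction xs generalizing j init with
  | nil =>
    rw [PySem.List.enumerate_nil, List.foldl_nil]
    apply List.ext_getElem (by simp [hl])
    intro i h1 h2
    simp only [List.getElem_map, List.getElem_range, pvEpick, List.append_nil,
      List.getD_eq_getElem?_getD, List.getElem?_eq_getElem h1, Option.getD_some]
  | cons x xs ih =>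
    simp only [PySem.List.enumerate_cons, List.foldl_cons, pvM1]
    have h1 : ((j : Int) + 1) = ((j + 1 : Nat) : Int) := by push_cast; ring
    rw [h1, ih (j+1) (init.modify (j % n) (fun b => b ++ [x])) (by simp [hl])]
    apply List.map_congr_left
    intro t ht
    rw [List.mem_range] at ht
    have hjn : j % n < n := Nat.mod_lt _ hn
    have hgd : (init.modify (j % n) (fun b => b ++ [x])).getD t []
        = (if j % n = t then init.getD t [] ++ [x] else init.getD t []) := by
      rw [List.getD_eq_getElem?_getD, List.getElem?_modify]
      rw [List.getElem?_eq_getElem (by omega : t < init.length)]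
      by_cases hjt : j % n = t <;>
        simp [hjt, List.getD_eq_getElem?_getD, List.getElem?_eq_getElem (by omega : t < init.length)]
    rw [hgd]
    show _ = init.getD t [] ++ ((if j % n = t then [x] else []) ++ pvEpick n xs (j+1) t)
    by_cases hjt : j % n = t <;> simp [hjt]

-- ===== VERDICT (by name: the statement is the Claim_ definition above) =====
theorem prep_subq_spec : Claim_equal_prep_subq := by
  intro KEYWORDS_DICT CHUNKS _
  unfold Spec_prep_subq prep_subq prep_subq_alt
  simp only [pv_foldl_flatten, List.nil_append, List.flatMap_def, List.map_id_fun', id]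
  set allkw := ((PySem.Dict.mk KEYWORDS_DICT).values).flatten with hkw
  by_cases hc : CHUNKS < 1
  · rw [if_pos hc, PySem.List.pyRange_one_eq_nil (by omega)]
    simp
  · rw [if_neg hc]
    push Not at hc
    obtain ⟨n, rfl⟩ : ∃ n : Nat, (n : Int) = CHUNKS := ⟨CHUNKS.toNat, Int.toNat_of_nonneg (by omega)⟩
    have hn : 0 < n := by exact_mod_cast hc
    simp only [Int.toNat_natCast]
    have hb := pv_fold_buckets n hn allkw 0 (List.replicate n ([] : List String)) (by simp)
    simp only [Nat.cast_zero] at hb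
    rw [hb, pv_foldl_append_map, List.nil_append]
    rw [PySem.List.pyRange_one 0 (n : Int)]
    simp only [Int.sub_zero, Int.toNat_natCast, List.map_map, Int.toNat_natCast]
    apply List.map_congr_left
    intro t ht
    rw [List.mem_range] at ht
    simp only [Function.comp, zero_add, List.getD_replicate ([] : List String) ht, List.nil_append]
    congr 1
    apply List.ext_getElem?
    intro k
    rw [pv_slice_getElem? allkw t n k hn, pv_epick_getElem? n allkw 0 t k hn ht]
    simp [Nat.mod_eq_of_lt ht]
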